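-- pv_equiv track=rewrite | github.com/4um3n/SoftUni-Courses | Python/Advanced/Advanced/0.5-Functions-Advanced/Exercises/odd_or_even.py | odd_or_even_sum
-- ===== SOURCE A (Python) =====
-- def odd_or_even_sum(command, nums, nums_len, result=None):
--     if command == "Odd" and result is None:
--         nums = list(filter(lambda x: x % 2 == 1, nums))
--         result = 0
--     elif command == "Even" and result is None:
--         nums = list(filter(lambda x: x % 2 == 0, nums))
--         result = 0
--
--     if not nums:
--         return result * nums_len
--
--     result += nums.pop(0)
--     return odd_or_even_sum(command, nums, nums_len, result)
-- ===== SOURCE B (Python) =====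
-- def odd_or_even_sum(command, nums, nums_len, result=None):
--     # Return-value equivalent of A; B does not mutate the caller's list.
--     if result is None:
--         result = 0
--         if command == "Odd":
--             nums = [x for x in nums if x % 2 == 1]
--         elif command == "Even":
--             nums = [x for x in nums if x % 2 == 0]
--     return (result + sum(nums)) * nums_len
-- ===== Notes on version B (the rewrite author's own statement) =====
-- stated objective: simpler
-- what changed: Replaces A's recursion-with-pop(0) (one call per element, mutating the list) by a single closed-form expression: normalize result/filter once, then return (result + sum(nums)) * nums_len.
-- outside the precondition, e.g. on odd_or_even_sum('Foo', [1, 2], 3, None): A raises TypeError, B returns 9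
import Mathlib
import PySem

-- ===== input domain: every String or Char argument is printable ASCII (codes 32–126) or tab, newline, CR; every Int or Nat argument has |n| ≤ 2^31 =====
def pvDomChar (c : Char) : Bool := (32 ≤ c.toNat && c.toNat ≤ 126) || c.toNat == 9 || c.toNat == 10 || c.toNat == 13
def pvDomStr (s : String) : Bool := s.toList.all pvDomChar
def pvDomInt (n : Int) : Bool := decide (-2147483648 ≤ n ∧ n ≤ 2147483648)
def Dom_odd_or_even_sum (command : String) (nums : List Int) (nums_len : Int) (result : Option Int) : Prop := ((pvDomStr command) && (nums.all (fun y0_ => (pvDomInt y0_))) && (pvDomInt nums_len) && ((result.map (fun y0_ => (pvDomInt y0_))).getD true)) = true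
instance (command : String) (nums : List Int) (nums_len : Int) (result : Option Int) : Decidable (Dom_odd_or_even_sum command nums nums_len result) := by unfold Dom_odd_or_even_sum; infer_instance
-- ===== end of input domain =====

-- B replaces A's recursion-with-pop by one closed-form sum; return values only
-- (A pops the caller's list in-place on the result≠None path, B does not mutate).

-- ===== PORT A =====
-- A's recursive calls always carry result = some r (the filter branches set result to 0),
-- so the recursion after the first step is this loop: pop the head, add, recurse.
def odd_or_even_sum_loop (nums : List Int) (nums_len : Int) (result : Int) : Int :=
  match nums with
  | [] => result * nums_len
  | x :: rest => odd_or_even_sum_loop rest nums_len (result + x)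

def odd_or_even_sum (command : String) (nums : List Int) (nums_len : Int) (result : Option Int) : Int :=
  if command = "Odd" ∧ result = none then
    odd_or_even_sum_loop (nums.filter (fun x => PySem.Int.mod x 2 = 1)) nums_len 0
  else if command = "Even" ∧ result = none then
    odd_or_even_sum_loop (nums.filter (fun x => PySem.Int.mod x 2 = 0)) nums_len 0
  else
    match result with
    | some r => odd_or_even_sum_loop nums nums_len r
    | none => 0   -- Python raises TypeError here (None in arithmetic); excluded by Pre_

-- ===== PORT B =====
def odd_or_even_sum_alt (command : String) (nums : List Int) (nums_len : Int) (result : Option Int) : Int :=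
  let p : Int × List Int :=
    match result with
    | none =>
      if command = "Odd" then (0, nums.filter (fun x => PySem.Int.mod x 2 = 1))
      else if command = "Even" then (0, nums.filter (fun x => PySem.Int.mod x 2 = 0))
      else (0, nums)
    | some r => (r, nums)
  (p.1 + p.2.sum) * nums_len

-- ===== PRECONDITION & SPEC =====
-- A raises TypeError exactly when result is None and command is neither "Odd" nor "Even".
def Pre_odd_or_even_sum (command : String) (nums : List Int) (nums_len : Int) (result : Option Int) : Prop :=
  result ≠ none ∨ command = "Odd" ∨ command = "Even"
instance (command : String) (nums : List Int) (nums_len : Int) (result : Option Int) : Decidable (Pre_odd_or_even_sum command nums nums_len result) := by unfold Pre_odd_or_even_sum; infer_instance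
def pvWitness_odd_or_even_sum : String × List Int × Int × Option Int := ("Odd", [1, 2, 3], 2, none)

def Spec_odd_or_even_sum (command : String) (nums : List Int) (nums_len : Int) (result : Option Int) (out : Int) : Prop := out = odd_or_even_sum_alt command nums nums_len result
instance (command : String) (nums : List Int) (nums_len : Int) (result : Option Int) (out : Int) : Decidable (Spec_odd_or_even_sum command nums nums_len result out) := by unfold Spec_odd_or_even_sum; infer_instance

-- ===== CLAIM (what is proved, stated in full; the proofs are below) =====
def Claim_equal_odd_or_even_sum : Prop := ∀ (command : String) (nums : List Int) (nums_len : Int) (result : Option Int), Dom_odd_or_even_sum command nums nums_len result → Pre_odd_or_even_sum command nums nums_len result → Spec_odd_or_even_sum command nums nums_len result (odd_or_even_sum command nums nums_len result)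

-- ===== LEMMAS AND PROOFS =====
theorem loop_eq_sum (nums : List Int) (nums_len r : Int) :
    odd_or_even_sum_loop nums nums_len r = (r + nums.sum) * nums_len := by
  induction nums generalizing r with
  | nil => simp [odd_or_even_sum_loop]
  | cons x rest ih =>
    simp only [odd_or_even_sum_loop, ih, List.sum_cons]
    ring

-- ===== VERDICT (by name: the statement is the Claim_ definition above) =====
theorem odd_or_even_sum_spec : Claim_equal_odd_or_even_sum := by
  intro command nums nums_len result _ hpre
  unfold Spec_odd_or_even_sum odd_or_even_sum odd_or_even_sum_alt
  cases result with
  | some r => simp [loop_eq_sum]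
  | none =>
    by_cases hc : command = "Odd"
    · simp [hc, loop_eq_sum]
    · have he : command = "Even" := by
        rcases hpre with h | h | h <;> simp_all
      simp [he, loop_eq_sum]
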